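-- pv_equiv track=rewrite | github.com/Devilfish281/midterm_440 | src/midterm_440/numeric_core/mdu.py | _sll_n
-- ===== SOURCE A (Python) =====
-- from typing import Dict, List, Optional, Tuple  # Changed Code
--
-- def _sll_n(bits: List[int], k: int) -> List[int]:
--     out = bits[:]
--     stages = (1, 2, 4, 8, 16, 32, 64)
--     for idx, st in enumerate(stages):
--         if (k >> idx) & 1:
--             tmp = [0] * len(out)
--             for i in range(len(out)):
--                 if i >= st:
--                     tmp[i] = out[i - st]
--             out = tmp
--     return out
-- ===== SOURCE B (Python) =====
-- def _sll_n(bits, k):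
--     s = k % 128
--     n = len(bits)
--     return [0] * min(s, n) + bits[:max(0, n - s)]
-- ===== Notes on version B (the rewrite author's own statement) =====
-- stated objective: simpler
-- what changed: Replaces the 7-stage barrel shifter (up to seven full rebuild passes selected by the bits of k) with a single direct construction: compute the effective shift s = k % 128 once and return min(s,n) zeros followed by the surviving prefix bits[:max(0,n-s)].
import Mathlib
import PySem

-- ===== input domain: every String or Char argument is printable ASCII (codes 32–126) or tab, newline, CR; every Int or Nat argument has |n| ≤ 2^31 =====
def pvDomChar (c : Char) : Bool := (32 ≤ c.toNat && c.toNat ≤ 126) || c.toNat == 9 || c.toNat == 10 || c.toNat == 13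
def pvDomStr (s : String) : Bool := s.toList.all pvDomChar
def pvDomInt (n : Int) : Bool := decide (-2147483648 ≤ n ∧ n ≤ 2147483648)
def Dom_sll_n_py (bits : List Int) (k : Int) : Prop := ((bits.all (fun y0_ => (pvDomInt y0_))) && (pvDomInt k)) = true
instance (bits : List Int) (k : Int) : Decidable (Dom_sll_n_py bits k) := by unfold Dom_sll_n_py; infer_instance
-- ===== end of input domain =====

-- B replaces A's 7-stage barrel shifter by one direct construction (shift amount k % 128 computed once); simpler, proved equal.


-- ===== PORT A =====
-- one stage of the barrel shifter: `if (k >> idx) & 1: tmp = [0]*len(out); for i in range(len(out)): if i >= st: tmp[i] = out[i-st]; out = tmp`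
-- (idx comes from `enumerate(stages)` so it is 0..6; `.toNat` on it is exact)
def sllStage (k : Int) (out : List Int) (p : Int × Int) : List Int :=
  if PySem.Int.band (k >>> p.1.toNat) 1 ≠ 0 then
    (PySem.List.pyRange 0 (out.length : Int) 1).foldl
      (fun tmp i =>
        if i ≥ p.2 then PySem.List.pySetD tmp i (PySem.List.pyGetD out (i - p.2) 0) else tmp)
      (List.replicate out.length 0)
  else out

def sll_n_py (bits : List Int) (k : Int) : List Int :=
  (PySem.List.enumerate [1, 2, 4, 8, 16, 32, 64]).foldl (sllStage k) (PySem.List.slice bits none none)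

-- ===== PORT B =====
def sll_n_py_alt (bits : List Int) (k : Int) : List Int :=
  let s : Int := PySem.Int.mod k 128
  let n : Int := (bits.length : Int)
  List.replicate (min s n).toNat 0 ++ PySem.List.slice bits none (some (max 0 (n - s)))

-- ===== PRECONDITION & SPEC =====
def Spec_sll_n_py (bits : List Int) (k : Int) (out : List Int) : Prop := out = sll_n_py_alt bits k
instance (bits : List Int) (k : Int) (out : List Int) : Decidable (Spec_sll_n_py bits k out) := by unfold Spec_sll_n_py; infer_instance

-- ===== CLAIM (what is proved, stated in full; the proofs are below) =====
def Claim_equal_sll_n_py : Prop := ∀ (bits : List Int) (k : Int), Dom_sll_n_py bits k → Spec_sll_n_py bits k (sll_n_py bits k)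

-- ===== LEMMAS AND PROOFS =====

/-- left shift by `s`: zeros in front, surviving prefix behind, as an index map. -/
def pvShift (s : Nat) (l : List Int) : List Int :=
  (List.range l.length).map (fun i => if s ≤ i then l.getD (i - s) 0 else 0)

theorem length_pvShift (s : Nat) (l : List Int) : (pvShift s l).length = l.length := by
  simp [pvShift]

theorem getElem_pvShift (s : Nat) (l : List Int) (i : Nat) (h : i < (pvShift s l).length) :
    (pvShift s l)[i] = if s ≤ i then l.getD (i - s) 0 else 0 := by
  simp [pvShift]

theorem getD_pvShift (b : Nat) (l : List Int) (j : Nat) :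
    (pvShift b l).getD j 0 =
      if j < l.length then (if b ≤ j then l.getD (j - b) 0 else 0) else 0 := by
  by_cases h : j < l.length
  · rw [List.getD_eq_getElem _ _ (by simpa [length_pvShift] using h), getElem_pvShift]
    simp [h]
  · rw [List.getD_eq_default _ _ (by simpa [length_pvShift] using Nat.le_of_not_lt h)]
    simp [h]

theorem pvShift_zero (l : List Int) : pvShift 0 l = l := by
  apply List.ext_getElem (by simp [length_pvShift])
  intro i h1 h2
  rw [getElem_pvShift]
  simp [List.getD, List.getElem?_eq_getElem h2]

theorem pvShift_comp (a b : Nat) (l : List Int) :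
    pvShift a (pvShift b l) = pvShift (a + b) l := by
  apply List.ext_getElem (by simp [length_pvShift])
  intro i h1 h2
  have hn : i < l.length := by simpa [length_pvShift] using h2
  rw [getElem_pvShift, getElem_pvShift, getD_pvShift]
  have hs : i - a - b = i - (a + b) := by omega
  split_ifs <;> first | (exfalso; omega) | rfl | rw [hs]

-- invariant of A's inner copy loop
theorem inner_inv (out : List Int) (st : Int) (hst : 0 ≤ st) :
    ∀ m, m ≤ out.length →
      (List.range m).foldl
        (fun tmp (j : Nat) =>
          if (j : Int) ≥ st then PySem.List.pySetD tmp (j : Int) (PySem.List.pyGetD out ((j : Int) - st) 0) else tmp)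
        (List.replicate out.length 0)
      = (List.range out.length).map
          (fun i => if st.toNat ≤ i ∧ i < m then out.getD (i - st.toNat) 0 else 0) := by
  intro m
  induction m with
  | zero =>
      intro _
      simp
  | succ m ih =>
      intro hm
      rw [List.range_succ, List.foldl_append, List.foldl_cons, List.foldl_nil, ih (by omega)]
      by_cases hc : (m : Int) ≥ st
      · rw [if_pos hc]
        have hv : ((m : Int) - st) = ((m - st.toNat : Nat) : Int) := by omega
        rw [PySem.List.pySetD_natCast, hv, PySem.List.pyGetD_natCast]
        apply List.ext_getElem (by simp)
        intro i h1 h2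
        have hi : i < out.length := by simpa using h2
        rw [List.getElem_set]
        simp only [List.getElem_map, List.getElem_range]
        split_ifs <;> first | rfl | (exfalso; omega) | (congr 1; omega)
      · rw [if_neg hc]
        apply List.map_congr_left
        intro i hi
        have : ¬ (st.toNat ≤ i ∧ i < m + 1) ∨ (st.toNat ≤ i ∧ i < m) := by omega
        split_ifs <;> first | rfl | (exfalso; omega)

-- A's inner copy loop builds exactly the direct shift
theorem inner_eq (out : List Int) (st : Int) (hst : 0 ≤ st) :
    (PySem.List.pyRange 0 (out.length : Int) 1).foldl
      (fun tmp i =>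
        if i ≥ st then PySem.List.pySetD tmp i (PySem.List.pyGetD out (i - st) 0) else tmp)
      (List.replicate out.length 0) = pvShift st.toNat out := by
  rw [PySem.List.pyRange_zero_nat]
  simp only [List.foldl_map]
  rw [inner_inv out st hst out.length (le_refl _)]
  unfold pvShift
  apply List.map_congr_left
  intro i hi
  have : i < out.length := List.mem_range.mp hi
  split_ifs <;> first | rfl | (exfalso; omega)

theorem sllStage_eq (k : Int) (l : List Int) (idxI stI : Int) (hst : 0 ≤ stI) :
    sllStage k l (idxI, stI)
      = pvShift (if (k >>> idxI.toNat) % 2 = 1 then stI.toNat else 0) l := by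
  unfold sllStage
  have hb : PySem.Int.band (k >>> idxI.toNat) 1 = (k >>> idxI.toNat) % 2 := by
    rw [PySem.Int.band_one, PySem.Int.mod_eq_emod_of_pos (by norm_num)]
  simp only [hb]
  rcases (by omega : (k >>> idxI.toNat) % 2 = 0 ∨ (k >>> idxI.toNat) % 2 = 1) with h | h
  · simp [h, pvShift_zero]
  · simp [h, inner_eq l stI hst]

theorem shiftRight_zero_int (x : Int) : x >>> (0 : Nat) = x := by cases x <;> rfl

theorem shiftRight_one_int (x : Int) : x >>> (1 : Nat) = x / 2 := by
  cases x with
  | ofNat m =>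
      show Int.ofNat (m >>> 1) = _
      rw [Nat.shiftRight_succ, Nat.shiftRight_zero]
      simp only [Int.ofNat_eq_natCast]
      omega
  | negSucc m =>
      show Int.negSucc (m >>> 1) = _
      rw [Nat.shiftRight_succ, Nat.shiftRight_zero]
      simp only [Int.negSucc_eq]
      omega

theorem shiftRight_succ_int (x : Int) (n : Nat) : x >>> (n + 1) = (x >>> n) / 2 := by
  rw [show x >>> (n + 1) = (x >>> n) >>> (1 : Nat) from by cases x <;> rfl, shiftRight_one_int]

theorem pvShift_eq_replicate_take (s : Nat) (l : List Int) :
    pvShift s l = List.replicate (min s l.length) 0 ++ l.take (l.length - s) := by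
  apply List.ext_getElem (by simp [length_pvShift]; omega)
  intro i h1 h2
  have hn : i < l.length := by simpa [length_pvShift] using h1
  rw [getElem_pvShift]
  by_cases hi : i < min s l.length
  · rw [List.getElem_append_left (by simpa using hi)]
    simp
    omega
  · have hsn : s ≤ i := by omega
    rw [List.getElem_append_right (by simp; omega)]
    simp only [List.length_replicate, List.getElem_take]
    rw [if_pos hsn, List.getD_eq_getElem _ _ (by omega)]
    congr 1
    omega

theorem B_eq (bits : List Int) (k : Int) :
    sll_n_py_alt bits k = pvShift ((PySem.Int.mod k 128).toNat) bits := by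
  simp only [sll_n_py_alt]
  have h0 : 0 ≤ PySem.Int.mod k 128 := PySem.Int.mod_nonneg (a := k) (by norm_num)
  rw [PySem.List.slice_to _ (le_max_left 0 _), pvShift_eq_replicate_take]
  rw [show (min (PySem.Int.mod k 128) (bits.length : Int)).toNat
        = min (PySem.Int.mod k 128).toNat bits.length from by omega,
      show (max 0 ((bits.length : Int) - PySem.Int.mod k 128)).toNat
        = bits.length - (PySem.Int.mod k 128).toNat from by omega]

-- ===== VERDICT (by name: the statement is the Claim_ definition above) =====
theorem sll_n_py_spec : Claim_equal_sll_n_py := by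
  unfold Claim_equal_sll_n_py
  intro bits k _hdom
  unfold Spec_sll_n_py
  rw [B_eq]
  unfold sll_n_py
  rw [show PySem.List.enumerate ([1, 2, 4, 8, 16, 32, 64] : List Int)
        = [(0, 1), (1, 2), (2, 4), (3, 8), (4, 16), (5, 32), (6, 64)] from rfl,
      PySem.List.slice_none_none]
  simp only [List.foldl_cons, List.foldl_nil]
  rw [sllStage_eq (idxI := 0) (stI := 1) (hst := by norm_num),
      sllStage_eq (idxI := 1) (stI := 2) (hst := by norm_num),
      sllStage_eq (idxI := 2) (stI := 4) (hst := by norm_num),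
      sllStage_eq (idxI := 3) (stI := 8) (hst := by norm_num),
      sllStage_eq (idxI := 4) (stI := 16) (hst := by norm_num),
      sllStage_eq (idxI := 5) (stI := 32) (hst := by norm_num),
      sllStage_eq (idxI := 6) (stI := 64) (hst := by norm_num)]
  simp only [pvShift_comp]
  congr 1
  rw [PySem.Int.mod_eq_emod_of_pos (by norm_num)]
  norm_num [shiftRight_zero_int]
  simp only [show Int.toNat 2 = 2 from rfl, show Int.toNat 3 = 3 from rfl,
    show Int.toNat 4 = 4 from rfl, show Int.toNat 5 = 5 from rfl,
    show Int.toNat 6 = 6 from rfl, show Int.toNat 8 = 8 from rfl,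
    show Int.toNat 16 = 16 from rfl, show Int.toNat 32 = 32 from rfl,
    show Int.toNat 64 = 64 from rfl]
  have h1 : k >>> (1 : Nat) = k / 2 := shiftRight_one_int k
  have h2 : k >>> (2 : Nat) = (k >>> (1 : Nat)) / 2 := shiftRight_succ_int k 1
  have h3 : k >>> (3 : Nat) = (k >>> (2 : Nat)) / 2 := shiftRight_succ_int k 2
  have h4 : k >>> (4 : Nat) = (k >>> (3 : Nat)) / 2 := shiftRight_succ_int k 3
  have h5 : k >>> (5 : Nat) = (k >>> (4 : Nat)) / 2 := shiftRight_succ_int k 4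
  have h6 : k >>> (6 : Nat) = (k >>> (5 : Nat)) / 2 := shiftRight_succ_int k 5
  obtain ⟨b0, hb0⟩ : ∃ b : Nat, (b : Int) = k % 2 :=
    ⟨_, Int.toNat_of_nonneg (Int.emod_nonneg _ (by norm_num))⟩
  obtain ⟨b1, hb1⟩ : ∃ b : Nat, (b : Int) = (k >>> (1 : Nat)) % 2 :=
    ⟨_, Int.toNat_of_nonneg (Int.emod_nonneg _ (by norm_num))⟩
  obtain ⟨b2, hb2⟩ : ∃ b : Nat, (b : Int) = (k >>> (2 : Nat)) % 2 :=
    ⟨_, Int.toNat_of_nonneg (Int.emod_nonneg _ (by norm_num))⟩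
  obtain ⟨b3, hb3⟩ : ∃ b : Nat, (b : Int) = (k >>> (3 : Nat)) % 2 :=
    ⟨_, Int.toNat_of_nonneg (Int.emod_nonneg _ (by norm_num))⟩
  obtain ⟨b4, hb4⟩ : ∃ b : Nat, (b : Int) = (k >>> (4 : Nat)) % 2 :=
    ⟨_, Int.toNat_of_nonneg (Int.emod_nonneg _ (by norm_num))⟩
  obtain ⟨b5, hb5⟩ : ∃ b : Nat, (b : Int) = (k >>> (5 : Nat)) % 2 :=
    ⟨_, Int.toNat_of_nonneg (Int.emod_nonneg _ (by norm_num))⟩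
  obtain ⟨b6, hb6⟩ : ∃ b : Nat, (b : Int) = (k >>> (6 : Nat)) % 2 :=
    ⟨_, Int.toNat_of_nonneg (Int.emod_nonneg _ (by norm_num))⟩
  have e0 : (if k % 2 = 1 then (1 : Nat) else 0) = 1 * b0 := by
    rcases (by omega : k % 2 = 0 ∨ k % 2 = 1) with h | h <;> simp [h] <;> omega
  have e1 : (if (k >>> (1 : Nat)) % 2 = 1 then (2 : Nat) else 0) = 2 * b1 := by
    rcases (by omega : (k >>> (1 : Nat)) % 2 = 0 ∨ (k >>> (1 : Nat)) % 2 = 1) with h | h <;> simp [h] <;> omega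
  have e2 : (if (k >>> (2 : Nat)) % 2 = 1 then (4 : Nat) else 0) = 4 * b2 := by
    rcases (by omega : (k >>> (2 : Nat)) % 2 = 0 ∨ (k >>> (2 : Nat)) % 2 = 1) with h | h <;> simp [h] <;> omega
  have e3 : (if (k >>> (3 : Nat)) % 2 = 1 then (8 : Nat) else 0) = 8 * b3 := by
    rcases (by omega : (k >>> (3 : Nat)) % 2 = 0 ∨ (k >>> (3 : Nat)) % 2 = 1) with h | h <;> simp [h] <;> omega
  have e4 : (if (k >>> (4 : Nat)) % 2 = 1 then (16 : Nat) else 0) = 16 * b4 := by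
    rcases (by omega : (k >>> (4 : Nat)) % 2 = 0 ∨ (k >>> (4 : Nat)) % 2 = 1) with h | h <;> simp [h] <;> omega
  have e5 : (if (k >>> (5 : Nat)) % 2 = 1 then (32 : Nat) else 0) = 32 * b5 := by
    rcases (by omega : (k >>> (5 : Nat)) % 2 = 0 ∨ (k >>> (5 : Nat)) % 2 = 1) with h | h <;> simp [h] <;> omega
  have e6 : (if (k >>> (6 : Nat)) % 2 = 1 then (64 : Nat) else 0) = 64 * b6 := by
    rcases (by omega : (k >>> (6 : Nat)) % 2 = 0 ∨ (k >>> (6 : Nat)) % 2 = 1) with h | h <;> simp [h] <;> omega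
  rw [e0, e1, e2, e3, e4, e5, e6]
  omega
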